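-- pv_equiv track=rewrite | github.com/bamaxw/ion | ion/main.py | pop_port
-- ===== SOURCE A (Python) =====
-- def isdigit( char ):
--     try:
--         int( char )
--         return True
--     except ValueError:
--         return False
--
-- def pop_port( url ):
--     if not len( url ):
--         return '', ''
--     if url[ 0 ] != ':':
--         return '', url
--     digits = False
--     for i, s in enumerate( url[ 1: ] ):
--         if isdigit( s ):
--             digits = True
--         elif s == '/':
--             if digits:
--                 return url[ :i + 1 ], url[ i+1: ]
--             else:
--                 return '', url
--     if digits:
--         return url, ''
--     return '', url
-- ===== SOURCE B (Python) =====
-- def isdigit(char):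
--     try:
--         int(char)
--         return True
--     except ValueError:
--         return False
--
-- def pop_port(url):
--     if not url:
--         return '', ''
--     if url[0] != ':':
--         return '', url
--     body, slash, tail = url[1:].partition('/')
--     if any(isdigit(c) for c in body):
--         return ':' + body, slash + tail
--     return '', url
-- ===== Notes on version B (the rewrite author's own statement) =====
-- stated objective: simpler
-- what changed: A's single stateful scan with an enumerate index and a digit-seen flag is replaced by partitioning the string after the colon at its first slash and testing whether the part before that slash contains a digit, rebuilding the two result pieces from the partition.
import Mathlib
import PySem

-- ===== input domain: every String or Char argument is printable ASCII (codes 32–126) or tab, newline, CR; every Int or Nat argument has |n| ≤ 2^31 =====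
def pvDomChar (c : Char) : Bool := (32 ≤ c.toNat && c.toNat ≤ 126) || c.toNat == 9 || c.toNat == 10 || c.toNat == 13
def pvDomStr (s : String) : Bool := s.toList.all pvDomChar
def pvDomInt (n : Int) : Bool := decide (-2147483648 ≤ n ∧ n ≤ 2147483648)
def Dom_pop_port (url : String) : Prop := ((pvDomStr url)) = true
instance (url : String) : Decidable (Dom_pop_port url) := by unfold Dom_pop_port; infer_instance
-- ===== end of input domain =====

-- B replaces A's stateful digit-flag scan by partition('/') plus a digit-existence test (objective: simpler).

-- ===== PORT A =====
-- isdigit(char): int(char) succeeds ↔ ValueError; exact via PySem.Int.ofChars?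
def pvIsdig (c : Char) : Bool := (PySem.Int.ofChars? [c]).isSome

-- the 'for i, s in enumerate(url[1:])' loop with the 'digits' flag; slices taken from the whole url
def pvLoopA (url : String) : List Char → Nat → Bool → String × String
  | [], _, digits => if digits then (url, "") else ("", url)
  | c :: t, i, digits =>
    if pvIsdig c then pvLoopA url t (i + 1) true
    else if c = '/' then
      (if digits then (PySem.Str.slice url none (some ((i : Int) + 1)),
                       PySem.Str.slice url (some ((i : Int) + 1)) none)
       else ("", url))
    else pvLoopA url t (i + 1) digits

def pop_port (url : String) : String × String :=
  if PySem.Str.len url = 0 then ("", "")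
  else if PySem.Str.pyGet? url 0 ≠ some ':' then ("", url)
  else pvLoopA url (PySem.Str.slice url (some 1) none).toList 0 false

-- ===== PORT B =====
-- hand port of str.partition(sep) for the single-char sep '/' (exact: sep has length 1, first occurrence splits)
def pvPartSlash : List Char → List Char × Bool × List Char
  | [] => ([], false, [])
  | c :: t =>
    if c = '/' then ([], true, t)
    else
      let p := pvPartSlash t
      (c :: p.1, p.2.1, p.2.2)

def pop_port_alt (url : String) : String × String :=
  if PySem.Str.len url = 0 then ("", "")
  else if PySem.Str.pyGet? url 0 ≠ some ':' then ("", url)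
  else
    let (body, slash, tail) := pvPartSlash (PySem.Str.slice url (some 1) none).toList
    if body.any pvIsdig then
      (String.ofList (':' :: body), String.ofList ((if slash then ['/'] else []) ++ tail))
    else ("", url)

-- ===== PRECONDITION & SPEC =====
def Spec_pop_port (url : String) (out : String × String) : Prop := out = pop_port_alt url
instance (url : String) (out : String × String) : Decidable (Spec_pop_port url out) := by unfold Spec_pop_port; infer_instance

-- ===== CLAIM (what is proved, stated in full; the proofs are below) =====
def Claim_equal_pop_port : Prop := ∀ (url : String), Dom_pop_port url → Spec_pop_port url (pop_port url)

-- ===== LEMMAS AND PROOFS =====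

theorem pvIsdig_slash_false : pvIsdig '/' = false := by decide

theorem pvLoopA_char (url : String) (t : List Char) (i : Nat) (digits : Bool) :
    pvLoopA url t i digits =
      (let (b, f, r) := pvPartSlash t
       if digits || b.any pvIsdig then
         (if f then (PySem.Str.slice url none (some ((i : Int) + b.length + 1)),
                     PySem.Str.slice url (some ((i : Int) + b.length + 1)) none)
          else (url, ""))
       else ("", url)) := by
  induction t generalizing i digits with
  | nil => simp [pvLoopA, pvPartSlash]
  | cons c t ih =>
    by_cases hd : pvIsdig c = true
    · have hcs : c ≠ '/' := by
        intro h; rw [h, pvIsdig_slash_false] at hd; exact absurd hd (by simp)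
      simp only [pvLoopA, pvPartSlash, hd, if_pos, hcs, if_false, ih]
      cases hp : pvPartSlash t with
      | mk b fr =>
        simp [hd, List.any_cons]
        ring_nf
    · by_cases hcs : c = '/'
      · subst hcs
        simp [pvLoopA, pvIsdig_slash_false, pvPartSlash]
      · simp only [pvLoopA, pvPartSlash, hd, hcs, if_false, ih]
        cases hp : pvPartSlash t with
        | mk b fr =>
          simp [hp, hd, List.any_cons]
          ring_nf

theorem pvPartSlash_eq (t : List Char) :
    (pvPartSlash t).2.1 = true → t = (pvPartSlash t).1 ++ '/' :: (pvPartSlash t).2.2 := by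
  induction t with
  | nil => simp [pvPartSlash]
  | cons c t ih =>
    by_cases hc : c = '/'
    · subst hc; simp [pvPartSlash]
    · simp only [pvPartSlash, hc, if_neg, if_false]
      cases hp : pvPartSlash t with
      | mk b fr =>
        intro hf
        simp_all

theorem pvPartSlash_noSlash (t : List Char) :
    (pvPartSlash t).2.1 = false → (pvPartSlash t).1 = t ∧ (pvPartSlash t).2.2 = [] := by
  induction t with
  | nil => simp [pvPartSlash]
  | cons c t ih =>
    by_cases hc : c = '/'
    · subst hc; simp [pvPartSlash]
    · simp only [pvPartSlash, hc, if_neg, if_false]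
      cases hp : pvPartSlash t with
      | mk b fr =>
        intro hf
        simp_all

theorem pvMainCase (url : String) (t b r : List Char) (f : Bool)
    (hu : url.toList = ':' :: t) (hp : pvPartSlash t = (b, f, r)) :
    (if (false || b.any pvIsdig) = true then
       if f = true then
         (PySem.Str.slice url none (some (((0 : Nat) : Int) + (b.length : Int) + 1)),
          PySem.Str.slice url (some (((0 : Nat) : Int) + (b.length : Int) + 1)) none)
       else (url, "")
     else ("", url)) =
    (if b.any pvIsdig = true then
       (String.ofList (':' :: b), String.ofList ((if f = true then ['/'] else []) ++ r))
     else ("", url)) := by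
  simp only [Bool.false_or]
  by_cases hd : b.any pvIsdig = true
  · simp only [hd, if_true]
    cases f with
    | false =>
      obtain ⟨hb, hr⟩ : b = t ∧ r = [] := by simpa [hp] using pvPartSlash_noSlash t
      subst hb hr
      have h2 : String.ofList (':' :: b) = url := by
        apply String.toList_inj.mp; simp [hu]
      simp [h2]
    | true =>
      have ht : t = b ++ '/' :: r := by simpa [hp] using pvPartSlash_eq t
      have hcast : (((0 : Nat) : Int) + (b.length : Int) + 1) = ((b.length + 1 : Nat) : Int) := by
        push_cast; ring
      refine Prod.ext ?_ ?_
      · show PySem.Str.slice url none (some (((0 : Nat) : Int) + (b.length : Int) + 1)) =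
          String.ofList (':' :: b)
        apply String.toList_inj.mp
        rw [hcast]
        simp only [PySem.Str.toList_slice, PySem.Chars.slice_eq_listSlice,
          PySem.List.slice_to_natCast]
        simp [hu, ht, List.take_append]
      · show PySem.Str.slice url (some (((0 : Nat) : Int) + (b.length : Int) + 1)) none =
          String.ofList ((if true = true then ['/'] else []) ++ r)
        apply String.toList_inj.mp
        rw [hcast]
        simp only [PySem.Str.toList_slice, PySem.Chars.slice_eq_listSlice,
          PySem.List.slice_from_natCast]
        simp [hu, ht, List.drop_append]
  · simp [hd]

theorem pop_port_spec : Claim_equal_pop_port := by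
  intro url _
  show pop_port url = pop_port_alt url
  by_cases hE : url = ""
  · subst hE; rfl
  · have hne : url.toList ≠ [] := by
      intro h; exact hE (String.toList_inj.mp (by simp [h]))
    have hlen : ¬ PySem.Str.len url = 0 := by
      simpa [pysem, List.length_eq_zero_iff] using hne
    unfold pop_port pop_port_alt
    rw [if_neg hlen, if_neg hlen]
    by_cases h1 : PySem.Str.pyGet? url 0 = some ':'
    · rw [if_neg (not_not_intro h1), if_neg (not_not_intro h1)]
      have h1' : url.toList[0]? = some ':' := by simpa [pysem] using h1
      have htail : (PySem.Str.slice url (some 1) none).toList = url.toList.tail := by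
        simp [pysem, PySem.List.slice_from_one]
      rw [pvLoopA_char, htail]
      obtain ⟨t, hu⟩ : ∃ t, url.toList = ':' :: t := by
        cases h : url.toList with
        | nil => exact absurd h hne
        | cons c t =>
          rw [h] at h1'
          simp at h1'
          subst h1'
          exact ⟨t, rfl⟩
      rw [hu]
      simp only [List.tail_cons]
      exact pvMainCase url t _ _ _ hu rfl
    · rw [if_pos (by simpa using h1), if_pos (by simpa using h1)]
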